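-- pv_equiv track=rewrite | github.com/MdAbedin/binarysearch | 0637 Concatenated Sums.py | solve
-- ===== SOURCE A (Python) =====
-- def solve(nums):
--     ans = 0
--     place_values = 0
--
--     for num in nums:
--         ans += num*len(nums)
--         place_values += 10**len(str(num))
--
--     ans += sum(nums)*place_values
--
--     return ans
-- ===== SOURCE B (Python) =====
-- def solve(nums):
--     total = 0
--     for a in nums:
--         for b in nums:
--             total += a * 10**len(str(b)) + b
--     return total
-- ===== Notes on version B (the rewrite author's own statement) =====
-- stated objective: alternative
-- what changed: B computes the sum directly as a naive O(n^2) double loop over all pairs (a,b) adding a*10**len(str(b))+b, instead of A's factored O(n) single pass with a place-value accumulator.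
import Mathlib
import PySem

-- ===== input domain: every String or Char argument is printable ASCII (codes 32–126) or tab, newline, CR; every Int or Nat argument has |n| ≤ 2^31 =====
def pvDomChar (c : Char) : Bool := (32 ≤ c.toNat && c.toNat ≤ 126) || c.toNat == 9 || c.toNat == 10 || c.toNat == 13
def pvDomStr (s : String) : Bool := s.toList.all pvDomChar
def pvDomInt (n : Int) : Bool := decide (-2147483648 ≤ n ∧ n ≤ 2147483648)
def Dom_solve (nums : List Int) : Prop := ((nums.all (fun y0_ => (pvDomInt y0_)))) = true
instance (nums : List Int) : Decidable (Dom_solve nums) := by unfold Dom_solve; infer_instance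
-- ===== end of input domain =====

-- B replaces A's factored O(n) single pass by a plain O(n^2) double loop over all pairs (alternative decomposition, not faster).

-- ===== PORT A =====
-- digits num = len(str(num))
def pvDigits (num : Int) : Nat := (PySem.Int.toChars num).length

def solve (nums : List Int) : Int :=
  let st := nums.foldl
    (fun (p : Int × Int) num =>
      (p.1 + num * (nums.length : Int), p.2 + 10 ^ pvDigits num))
    (0, 0)
  st.1 + nums.sum * st.2

-- ===== PORT B =====
def solve_alt (nums : List Int) : Int :=
  nums.foldl
    (fun total a =>
      nums.foldl (fun t b => t + (a * 10 ^ pvDigits b + b)) total)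
    0

-- ===== PRECONDITION & SPEC =====
def Spec_solve (nums : List Int) (out : Int) : Prop := out = solve_alt nums
instance (nums : List Int) (out : Int) : Decidable (Spec_solve nums out) := by unfold Spec_solve; infer_instance

-- ===== CLAIM (what is proved, stated in full; the proofs are below) =====
def Claim_equal_solve : Prop := ∀ (nums : List Int), Dom_solve nums → Spec_solve nums (solve nums)

-- ===== LEMMAS AND PROOFS =====

-- A's loop, with the two accumulators generalised.
theorem solveA_fold (l : List Int) (c x y : Int) :
    l.foldl (fun (p : Int × Int) num =>
      (p.1 + num * c, p.2 + 10 ^ pvDigits num)) (x, y)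
    = (x + l.sum * c, y + (l.map (fun b => (10:Int) ^ pvDigits b)).sum) := by
  induction l generalizing x y with
  | nil => simp
  | cons a t ih => simp [List.foldl, ih]; constructor <;> ring

-- B's inner loop adds a * P + S in one pass.
theorem solveB_inner (l : List Int) (a t0 : Int) :
    l.foldl (fun t b => t + (a * 10 ^ pvDigits b + b)) t0
    = t0 + a * (l.map (fun b => (10:Int) ^ pvDigits b)).sum + l.sum := by
  induction l generalizing t0 with
  | nil => simp
  | cons b t ih => simp [List.foldl, ih]; ring

-- B's outer loop.
theorem solveB_outer (l m : List Int) (t0 : Int) :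
    l.foldl (fun total a =>
      m.foldl (fun t b => t + (a * 10 ^ pvDigits b + b)) total) t0
    = t0 + l.sum * (m.map (fun b => (10:Int) ^ pvDigits b)).sum
        + (l.length : Int) * m.sum := by
  induction l generalizing t0 with
  | nil => simp
  | cons a t ih =>
    rw [List.foldl_cons, solveB_inner, ih]
    simp only [List.sum_cons, List.length_cons]
    push_cast
    ring

-- ===== VERDICT (by name: the statement is the Claim_ definition above) =====
theorem solve_spec : Claim_equal_solve := by
  intro nums _
  unfold Spec_solve solve solve_alt
  rw [solveA_fold, solveB_outer]
  ring
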